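-- pv_equiv track=rewrite | github.com/eliottcassidy2000/math | 04-computation/W_half_i_vanishing.py | count_cycles
-- ===== SOURCE A (Python) =====
-- from itertools import combinations
--
-- def count_cycles(A, n, L):
--     total = 0
--     for verts in combinations(range(n), L):
--         sub = [[A[verts[i]][verts[j]] for j in range(L)] for i in range(L)]
--         dp = [[0] * L for _ in range(1 << L)]
--         dp[1][0] = 1
--         for m in range(1, 1 << L):
--             for v in range(L):
--                 if not (m & (1 << v)) or dp[m][v] == 0:
--                     continue
--                 for u in range(L):
--                     if m & (1 << u):
--                         continue
--                     if sub[v][u]: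
--                         dp[m | (1 << u)][u] += dp[m][v]
--         full = (1 << L) - 1
--         total += sum(dp[full][v] for v in range(1, L) if sub[v][0])
--     return total
-- ===== SOURCE B (Python) =====
-- def count_cycles(A, n, L):
--     # DFS/backtracking over simple paths: each counted cycle starts at its minimum
--     # vertex s and only visits vertices > s, so every directed cycle is counted once.
--     if L < 2:
--         return 0
--
--     def ways(v, rem, k):
--         # number of ways to extend the path ending at v by k more vertices drawn
--         # from rem (following edge direction), then close back to the start s
--         if k == 0:
--             return 1 if A[v][s] else 0
--         if len(rem) < k:
--             return 0
--         total = 0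
--         for w in rem:
--             if A[v][w]:
--                 total += ways(w, [x for x in rem if x != w], k - 1)
--         return total
--
--     total = 0
--     for s in range(n):
--         if n - s < L:
--             continue  # fewer than L vertices available from s upward
--         total += ways(s, list(range(s + 1, n)), L - 1)
--     return total
-- ===== Notes on version B (the rewrite author's own statement) =====
-- stated objective: alternative
-- what changed: Replaces the combinations-enumeration with a Held-Karp bitmask DP per subset by direct DFS/backtracking over simple paths that start at each cycle's minimum vertex, pruning when an edge is missing or too few candidates remain.
import Mathlib
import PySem

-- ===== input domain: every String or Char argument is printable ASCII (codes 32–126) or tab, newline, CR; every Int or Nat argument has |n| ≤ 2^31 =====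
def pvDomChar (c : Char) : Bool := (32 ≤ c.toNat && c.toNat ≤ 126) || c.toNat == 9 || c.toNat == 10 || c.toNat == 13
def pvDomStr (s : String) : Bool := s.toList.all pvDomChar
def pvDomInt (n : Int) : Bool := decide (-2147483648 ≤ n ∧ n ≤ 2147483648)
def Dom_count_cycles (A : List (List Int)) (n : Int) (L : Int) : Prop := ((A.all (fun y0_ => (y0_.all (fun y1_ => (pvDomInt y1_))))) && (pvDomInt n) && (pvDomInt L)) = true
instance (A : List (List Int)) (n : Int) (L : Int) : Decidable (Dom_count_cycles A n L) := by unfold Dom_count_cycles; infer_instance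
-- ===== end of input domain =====

-- B replaces A's per-subset Held–Karp bitmask DP by direct DFS/backtracking from each
-- cycle's minimum vertex (a different algorithm of similar cost); return values only,
-- neither program mutates its arguments.

-- A[i][j] for indices that Python accepts without IndexError (guaranteed by Pre_ for
-- every access both programs make); exact there, default 0 outside.
def pvGet2 (A : List (List Int)) (i j : Int) : Int :=
  (PySem.List.pyGet? ((PySem.List.pyGet? A i).getD []) j).getD 0

-- ===== PORT A =====
-- itertools.combinations(l, k) in its lexicographic emission order
def combosA (l : List Int) (k : Nat) : List (List Int) :=
  match l, k with
  | _, 0 => [[]]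
  | [], _ + 1 => []
  | x :: xs, k + 1 => (combosA xs k).map (fun S => x :: S) ++ combosA xs (k + 1)

-- dp[i][j] read/write on the rectangular list-of-lists state (indices in range wherever A runs)
def get2 (dp : List (List Int)) (i j : Nat) : Int := (dp.getD i []).getD j 0
def set2 (dp : List (List Int)) (i j : Nat) (x : Int) : List (List Int) :=
  dp.set i ((dp.getD i []).set j x)

-- the body of A's `for verts in combinations(range(n), L)` loop
def cycBody (A : List (List Int)) (L : Int) (verts : List Int) : Int :=
  let Lk := L.toNat
  let sub : List (List Int) :=
    (List.range Lk).map (fun i => (List.range Lk).map (fun j =>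
      pvGet2 A (verts.getD i 0) (verts.getD j 0)))
  let dp0 : List (List Int) := set2 (List.replicate (2 ^ Lk) (List.replicate Lk 0)) 1 0 1
  let dp := (List.range' 1 (2 ^ Lk - 1)).foldl (fun dp m =>
    (List.range Lk).foldl (fun dp v =>
      if ¬ m.testBit v ∨ get2 dp m v = 0 then dp
      else (List.range Lk).foldl (fun dp u =>
        if m.testBit u then dp
        else if get2 sub v u ≠ 0 then
          set2 dp (m ||| 2 ^ u) u (get2 dp (m ||| 2 ^ u) u + get2 dp m v)
        else dp) dp) dp) dp0
  let full := 2 ^ Lk - 1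
  (List.range' 1 (Lk - 1)).foldl (fun s v =>
    if get2 sub v 0 ≠ 0 then s + get2 dp full v else s) 0

def count_cycles (A : List (List Int)) (n : Int) (L : Int) : Int :=
  (combosA (PySem.List.pyRange 0 n 1) L.toNat).foldl
    (fun total verts => total + cycBody A L verts) 0

-- ===== PORT B =====
-- ways(v, rem, k): extend the path ending at v by k vertices from rem, close back to s
def waysB (A : List (List Int)) (s : Int) : Int → List Int → Nat → Int
  | v, _, 0 => if pvGet2 A v s ≠ 0 then 1 else 0
  | v, rem, k + 1 =>
    if rem.length < k + 1 then 0
    else rem.foldl (fun t w =>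
      if pvGet2 A v w ≠ 0 then t + waysB A s w (rem.filter (fun x => x ≠ w)) k else t) 0

def count_cycles_alt (A : List (List Int)) (n : Int) (L : Int) : Int :=
  if L < 2 then 0
  else (PySem.List.pyRange 0 n 1).foldl (fun t s =>
    if n - s < L then t
    else t + waysB A s s (PySem.List.pyRange (s + 1) n 1) (L - 1).toNat) 0

-- ===== PRECONDITION & SPEC =====
-- Exactly the inputs on which Python A returns: L ≥ 1 (L ≤ 0 raises ValueError/IndexError),
-- and whenever L ≤ n every access A makes must be in range: n rows, and each row i < n long
-- enough for the columns read (all of 0..n-1 when L ≥ 2, only column i when L = 1).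
def Pre_count_cycles (A : List (List Int)) (n : Int) (L : Int) : Prop :=
  1 ≤ L ∧ (L ≤ n → (n ≤ (A.length : Int) ∧
    ∀ i ∈ List.range n.toNat,
      (if L = 1 then (i : Int) < ((A.getD i []).length : Int)
       else n ≤ ((A.getD i []).length : Int))))
instance (A : List (List Int)) (n : Int) (L : Int) : Decidable (Pre_count_cycles A n L) := by
  unfold Pre_count_cycles; infer_instance

def pvWitness_count_cycles : List (List Int) × Int × Int := ([[0, 1], [1, 0]], 2, 2)

def Spec_count_cycles (A : List (List Int)) (n : Int) (L : Int) (out : Int) : Prop := out = count_cycles_alt A n L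
instance (A : List (List Int)) (n : Int) (L : Int) (out : Int) : Decidable (Spec_count_cycles A n L out) := by unfold Spec_count_cycles; infer_instance

-- ===== CLAIM (what is proved, stated in full; the proofs are below) =====
def Claim_equal_count_cycles : Prop := ∀ (A : List (List Int)) (n : Int) (L : Int), Dom_count_cycles A n L → Pre_count_cycles A n L → Spec_count_cycles A n L (count_cycles A n L)

-- ===== LEMMAS AND PROOFS =====

-- ---------- generic sum helpers ----------
theorem pv_foldl_if_add {α : Type} (l : List α) (p : α → Prop) [DecidablePred p]
    (g : α → Int) (a : Int) :
    l.foldl (fun t w => if p w then t + g w else t) a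
      = a + (l.map (fun w => if p w then g w else 0)).sum := by
  induction l generalizing a with
  | nil => simp
  | cons x xs ih =>
    simp only [List.foldl_cons, List.map_cons, List.sum_cons]
    by_cases hx : p x
    · rw [if_pos hx, if_pos hx, ih]; ring
    · rw [if_neg hx, if_neg hx, ih]; ring

theorem pv_foldl_if_skip {α : Type} (l : List α) (p : α → Prop) [DecidablePred p]
    (g : α → Int) (a : Int) :
    l.foldl (fun t w => if p w then t else t + g w) a
      = a + (l.map (fun w => if p w then 0 else g w)).sum := by
  induction l generalizing a with
  | nil => simp
  | cons x xs ih =>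
    simp only [List.foldl_cons, List.map_cons, List.sum_cons]
    by_cases hx : p x
    · rw [if_pos hx, if_pos hx, ih]; ring
    · rw [if_neg hx, if_neg hx, ih]; ring

theorem pv_sum_drop_zero {α : Type} [DecidableEq α] (l : List α) (g : α → Int) (w : α)
    (h : g w = 0) : ((l.filter (fun x => x ≠ w)).map g).sum = (l.map g).sum := by
  induction l with
  | nil => simp
  | cons x xs ih =>
    simp only [List.filter_cons, ne_eq, decide_not]
    simp only [ne_eq, decide_not] at ih
    by_cases hx : x = w
    · simp [hx, h, ih]
    · simp [hx, ih]

theorem pv_sum_congr {α : Type} (l : List α) (g g' : α → Int)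
    (h : ∀ x ∈ l, g x = g' x) : (l.map g).sum = (l.map g').sum := by
  induction l with
  | nil => simp
  | cons x xs ih =>
    simp only [List.map_cons, List.sum_cons]
    rw [h x (by simp), ih (fun y hy => h y (by simp [hy]))]

theorem pv_pairswap {α : Type} [DecidableEq α] (l : List α) (hl : l.Nodup)
    (h : α → α → Int) :
    (l.map (fun a => ((l.filter (fun x => x ≠ a)).map (fun w => h a w)).sum)).sum
      = (l.map (fun w => ((l.filter (fun x => x ≠ w)).map (fun a => h a w)).sum)).sum := by
  induction l with
  | nil => simp
  | cons x xs ih =>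
    have hx : x ∉ xs := (List.nodup_cons.1 hl).1
    have hnd : xs.Nodup := (List.nodup_cons.1 hl).2
    have hfx : xs.filter (fun y => y ≠ x) = xs := by
      apply List.filter_eq_self.2
      intro a ha; simp; rintro rfl; exact hx ha
    have hfy : ∀ w ∈ xs, (x :: xs).filter (fun y => y ≠ w) = x :: xs.filter (fun y => y ≠ w) := by
      intro w hw
      rw [List.filter_cons]
      have : x ≠ w := by rintro rfl; exact hx hw
      simp [this]
    have hhead : (x :: xs).filter (fun y => y ≠ x) = xs := by
      rw [List.filter_cons]; simp [hfx]
      intro a ha hax; subst hax; exact hx ha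
    simp only [List.map_cons, List.sum_cons]
    rw [hhead]
    have lhs2 : (xs.map (fun a => (((x :: xs).filter (fun y => y ≠ a)).map (fun w => h a w)).sum)).sum
        = (xs.map (fun a => h a x + ((xs.filter (fun y => y ≠ a)).map (fun w => h a w)).sum)).sum := by
      apply pv_sum_congr; intro a ha; rw [hfy a ha]; simp
    have rhs2 : (xs.map (fun w => (((x :: xs).filter (fun y => y ≠ w)).map (fun a => h a w)).sum)).sum
        = (xs.map (fun w => h x w + ((xs.filter (fun y => y ≠ w)).map (fun a => h a w)).sum)).sum := by
      apply pv_sum_congr; intro w hw; rw [hfy w hw]; simp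
    rw [lhs2, rhs2, List.sum_map_add, List.sum_map_add, ih hnd]
    ring

theorem pv_sum_sum_comm {α β : Type} (l : List α) (l' : List β) (h : α → β → Int) :
    (l.map (fun a => (l'.map (fun b => h a b)).sum)).sum
      = (l'.map (fun b => (l.map (fun a => h a b)).sum)).sum := by
  induction l with
  | nil => simp
  | cons x xs ih =>
    simp only [List.map_cons, List.sum_cons, ih, ← List.sum_map_add]

-- ---------- bit toolbox ----------
theorem pvOrAdd (t : Nat) : ∀ (m : Nat), m.testBit t = false → m ||| 2 ^ t = m + 2 ^ t := by
  induction t with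
  | zero =>
    intro m h
    have hm : m % 2 = 0 := by
      have := Nat.toNat_testBit m 0; simp [h] at this; omega
    have hbit : Nat.bit false (m / 2) = m := by rw [Nat.bit_val]; simp; omega
    have h1 : (1 : Nat) = Nat.bit true 0 := by rw [Nat.bit_val]; simp
    rw [pow_zero, ← hbit, h1, Nat.lor_bit]
    rw [Nat.bit_val, Nat.bit_val]; simp
  | succ t ih =>
    intro m h
    set b := decide (m % 2 = 1) with hb
    have hbt : b.toNat = m % 2 := by
      rcases Nat.mod_two_eq_zero_or_one m with h' | h' <;> simp [hb, h']
    have hbit : Nat.bit b (m / 2) = m := by rw [Nat.bit_val]; omega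
    have htb : (m / 2).testBit t = false := by
      rw [← hbit] at h; rwa [Nat.testBit_bit_succ] at h
    have h2 : (2 : Nat) ^ (t + 1) = Nat.bit false (2 ^ t) := by rw [Nat.bit_val]; simp; ring
    rw [← hbit, h2, Nat.lor_bit, ih _ htb]
    rw [Nat.bit_val, Nat.bit_val]
    have hbf : (b || false) = b := by simp
    rw [hbf]; ring_nf; omega

theorem pvSubBit (m t : Nat) (h : m.testBit t = true) : (m - 2 ^ t).testBit t = false := by
  have hq := Nat.div_add_mod m (2 ^ t)
  have hr : m % 2 ^ t < 2 ^ t := Nat.mod_lt _ (by positivity)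
  have hodd : m / 2 ^ t % 2 = 1 := by
    have := Nat.toNat_testBit m t; simp [h] at this; omega
  have hq1 : 1 ≤ m / 2 ^ t :=
    (Nat.one_le_div_iff (by positivity)).2 (Nat.ge_two_pow_of_testBit h)
  have hsplit : 2 ^ t * (m / 2 ^ t) = 2 ^ t * (m / 2 ^ t - 1) + 2 ^ t := by
    rw [← Nat.mul_succ]; congr 1; omega
  have hdecomp : m - 2 ^ t = 2 ^ t * (m / 2 ^ t - 1) + m % 2 ^ t := by omega
  rw [Nat.testBit_eq_decide_div_mod_eq, hdecomp,
      Nat.mul_add_div (by positivity), Nat.div_eq_of_lt hr]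
  simp; omega

theorem pvSubBitNe (m t i : Nat) (h : m.testBit t = true) (hne : i ≠ t) :
    (m - 2 ^ t).testBit i = m.testBit i := by
  have h1 := pvSubBit m t h
  have h2 : (m - 2 ^ t) ||| 2 ^ t = (m - 2 ^ t) + 2 ^ t := pvOrAdd t _ h1
  have h3 : 2 ^ t ≤ m := Nat.ge_two_pow_of_testBit h
  have h4 : (m - 2 ^ t) ||| 2 ^ t = m := by omega
  conv_rhs => rw [← h4]
  rw [Nat.testBit_or, Nat.testBit_two_pow]
  simp [Ne.symm hne]

theorem pvOrSub (m t : Nat) (h : m.testBit t = false) : (m ||| 2 ^ t) - 2 ^ t = m := by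
  rw [pvOrAdd t m h]; omega

theorem pvOrNe (m t : Nat) (h : m.testBit t = false) : m ||| 2 ^ t ≠ m := by
  rw [pvOrAdd t m h]
  have : 0 < 2 ^ t := Nat.two_pow_pos t
  omega

theorem pvSubOr (m t : Nat) (h : m.testBit t = true) : (m - 2 ^ t) ||| 2 ^ t = m := by
  have h1 := pvSubBit m t h
  have h3 : 2 ^ t ≤ m := Nat.ge_two_pow_of_testBit h
  rw [pvOrAdd t _ h1]; omega

-- ---------- dp state lemmas ----------
def Shape (Lk : Nat) (dp : List (List Int)) : Prop :=
  dp.length = 2 ^ Lk ∧ ∀ r ∈ dp, r.length = Lk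

theorem shape_set2 {Lk : Nat} {dp : List (List Int)} (h : Shape Lk dp) (i j : Nat) (x : Int)
    (hi : i < dp.length) : Shape Lk (set2 dp i j x) := by
  obtain ⟨hlen, hrow⟩ := h
  constructor
  · rw [set2, List.length_set]; exact hlen
  · intro r hr
    rcases List.mem_or_eq_of_mem_set hr with hr' | hr'
    · exact hrow r hr'
    · subst hr'
      rw [List.length_set]
      apply hrow
      rw [List.getD_eq_getElem?_getD, List.getElem?_eq_getElem hi]
      exact List.getElem_mem hi

theorem get2_set2_self {dp : List (List Int)} {i j : Nat} (x : Int)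
    (hi : i < dp.length) (hj : j < (dp.getD i []).length) :
    get2 (set2 dp i j x) i j = x := by
  have h1 : (set2 dp i j x).getD i [] = (dp.getD i []).set j x := by
    rw [set2, List.getD_eq_getElem?_getD, List.getElem?_set_self hi]; rfl
  unfold get2
  rw [h1, List.getD_eq_getElem?_getD, List.getElem?_set_self hj, Option.getD_some]

theorem get2_set2_ne {dp : List (List Int)} {i j i' j' : Nat} (x : Int)
    (h : i ≠ i' ∨ j ≠ j') : get2 (set2 dp i j x) i' j' = get2 dp i' j' := by
  rcases h with h | h
  · have h1 : (set2 dp i j x).getD i' [] = dp.getD i' [] := by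
      rw [set2, List.getD_eq_getElem?_getD, List.getElem?_set_ne h, ← List.getD_eq_getElem?_getD]
    unfold get2; rw [h1]
  · by_cases hii : i = i'
    · subst hii
      by_cases hlt : i < dp.length
      · have h1 : (set2 dp i j x).getD i [] = (dp.getD i []).set j x := by
          rw [set2, List.getD_eq_getElem?_getD, List.getElem?_set_self hlt]; rfl
        unfold get2
        rw [h1, List.getD_eq_getElem?_getD, List.getElem?_set_ne h, ← List.getD_eq_getElem?_getD]
      · have h1 : set2 dp i j x = dp := by
          rw [set2]; exact List.set_eq_of_length_le (by omega)
        rw [h1]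
    · have h1 : (set2 dp i j x).getD i' [] = dp.getD i' [] := by
        rw [set2, List.getD_eq_getElem?_getD, List.getElem?_set_ne hii, ← List.getD_eq_getElem?_getD]
      unfold get2; rw [h1]

theorem row_len {Lk : Nat} {dp : List (List Int)} (h : Shape Lk dp) {i : Nat}
    (hi : i < dp.length) : (dp.getD i []).length = Lk := by
  rw [List.getD_eq_getElem?_getD, List.getElem?_eq_getElem hi]
  exact h.2 _ (List.getElem_mem hi)

-- ---------- the path-count function the DP table computes ----------
-- pc f Lk m v = number of f-paths that start at node 0, visit exactly the bits of m, end at v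
def pc (f : Nat → Nat → Int) (Lk : Nat) (m v : Nat) : Int :=
  if h : m.testBit v then
    if m - 2 ^ v = 0 then (if v = 0 then 1 else 0)
    else ((List.range Lk).map (fun u =>
      if (m - 2 ^ v).testBit u ∧ f u v ≠ 0 then pc f Lk (m - 2 ^ v) u else 0)).sum
  else 0
termination_by m
decreasing_by
  have h2 : 2 ^ v ≤ m := Nat.ge_two_pow_of_testBit h
  have : 0 < 2 ^ v := Nat.two_pow_pos v
  omega

def pcStep (f : Nat → Nat → Int) (Lk : Nat) (m t : Nat) : Int :=
  ((List.range Lk).map (fun v => if m.testBit v ∧ f v t ≠ 0 then pc f Lk m v else 0)).sum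

theorem pc_eq (f : Nat → Nat → Int) (Lk m v : Nat) (h : m.testBit v)
    (h2 : m - 2 ^ v ≠ 0) : pc f Lk m v = pcStep f Lk (m - 2 ^ v) v := by
  rw [pc, pcStep]; simp [h, h2]

theorem pc_singleton (f : Nat → Nat → Int) (Lk m v : Nat) (h : m.testBit v)
    (h2 : m - 2 ^ v = 0) : pc f Lk m v = (if v = 0 then 1 else 0) := by
  rw [pc]; simp [h, h2]

def baseD (j t : Nat) : Int := if j = 1 ∧ t = 0 then 1 else 0

def Dfun (f : Nat → Nat → Int) (Lk k j t : Nat) : Int :=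
  if j.testBit t ∧ t < Lk ∧ j - 2 ^ t ≠ 0 ∧ j - 2 ^ t ≤ k then pcStep f Lk (j - 2 ^ t) t
  else baseD j t

theorem Dfun_eq_pc (f : Nat → Nat → Int) (Lk k j t : Nat) (ht : t < Lk)
    (hb : j.testBit t) (hk : j - 2 ^ t ≤ k) : Dfun f Lk k j t = pc f Lk j t := by
  by_cases h0 : j - 2 ^ t = 0
  · have hj : j = 2 ^ t := by
      have := Nat.ge_two_pow_of_testBit hb; omega
    rw [Dfun, if_neg (by simp [h0]), pc_singleton f Lk j t hb h0, baseD]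
    subst hj
    by_cases ht0 : t = 0
    · subst ht0; simp
    · simp [ht0]
  · rw [Dfun, if_pos ⟨hb, ht, h0, hk⟩, pc_eq f Lk j t hb h0]

-- ---------- the three nested fold lemmas ----------
theorem pv_foldU (Lk : Nat) (f : Nat → Nat → Int) (m v : Nat) (hm : m < 2 ^ Lk)
    (hmv : m.testBit v = true) :
    ∀ (us : List Nat) (dp : List (List Int)), us.Nodup → (∀ u ∈ us, u < Lk) → Shape Lk dp →
    Shape Lk (us.foldl (fun dp u =>
        if m.testBit u then dp
        else if f v u ≠ 0 then
          set2 dp (m ||| 2 ^ u) u (get2 dp (m ||| 2 ^ u) u + get2 dp m v)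
        else dp) dp) ∧
    ∀ j t, get2 (us.foldl (fun dp u =>
        if m.testBit u then dp
        else if f v u ≠ 0 then
          set2 dp (m ||| 2 ^ u) u (get2 dp (m ||| 2 ^ u) u + get2 dp m v)
        else dp) dp) j t
      = get2 dp j t +
        (if t ∈ us ∧ ¬ m.testBit t ∧ f v t ≠ 0 ∧ j = m ||| 2 ^ t then get2 dp m v else 0) := by
  intro us
  induction us with
  | nil =>
    intro dp _ _ hsh
    exact ⟨hsh, fun j t => by simp⟩
  | cons u us ih =>
    intro dp hnd hlt hsh
    have hndt : us.Nodup := (List.nodup_cons.1 hnd).2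
    have hu_nin : u ∉ us := (List.nodup_cons.1 hnd).1
    have hltt : ∀ x ∈ us, x < Lk := fun x hx => hlt x (List.mem_cons_of_mem u hx)
    have huLk : u < Lk := hlt u List.mem_cons_self
    simp only [List.foldl_cons]
    by_cases hbu : m.testBit u
    · rw [if_pos hbu]
      obtain ⟨hsh', hval⟩ := ih dp hndt hltt hsh
      refine ⟨hsh', fun j t => ?_⟩
      rw [hval j t]
      by_cases htu : t = u
      · subst htu
        rw [if_neg (by rintro ⟨_, hc, _⟩; exact hc hbu),
            if_neg (by rintro ⟨_, hc, _⟩; exact hc hbu)]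
      · by_cases hmem : t ∈ us
        · have : t ∈ u :: us := List.mem_cons_of_mem u hmem
          by_cases hcond : ¬ m.testBit t ∧ f v t ≠ 0 ∧ j = m ||| 2 ^ t
          · rw [if_pos ⟨hmem, hcond⟩, if_pos ⟨this, hcond⟩]
          · rw [if_neg (by rintro ⟨_, hc⟩; exact hcond hc),
                if_neg (by rintro ⟨_, hc⟩; exact hcond hc)]
        · have hnm : t ∉ u :: us := by
            simp only [List.mem_cons]; push_neg; exact ⟨htu, hmem⟩
          rw [if_neg (by rintro ⟨hc, _⟩; exact hmem hc),
              if_neg (by rintro ⟨hc, _⟩; exact hnm hc)]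
    · rw [if_neg hbu]
      by_cases hfv : f v u ≠ 0
      · rw [if_pos hfv]
        have hj0 : (m ||| 2 ^ u) < 2 ^ Lk :=
          Nat.or_lt_two_pow hm (Nat.pow_lt_pow_right (by norm_num) huLk)
        have hbu' : m.testBit u = false := by
          cases h : m.testBit u
          · rfl
          · exact absurd h hbu
        have hj0m : (m ||| 2 ^ u) ≠ m := pvOrNe m u hbu'
        have hj0len : (m ||| 2 ^ u) < dp.length := by rw [hsh.1]; exact hj0
        have hrow : (dp.getD (m ||| 2 ^ u) []).length = Lk := row_len hsh hj0len
        have hsh' : Shape Lk (set2 dp (m ||| 2 ^ u) u (get2 dp (m ||| 2 ^ u) u + get2 dp m v)) :=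
          shape_set2 hsh _ _ _ hj0len
        have hget_self : get2 (set2 dp (m ||| 2 ^ u) u (get2 dp (m ||| 2 ^ u) u + get2 dp m v))
            (m ||| 2 ^ u) u = get2 dp (m ||| 2 ^ u) u + get2 dp m v :=
          get2_set2_self _ hj0len (by rw [hrow]; exact huLk)
        have hget_ne : ∀ j t, (m ||| 2 ^ u) ≠ j ∨ u ≠ t →
            get2 (set2 dp (m ||| 2 ^ u) u (get2 dp (m ||| 2 ^ u) u + get2 dp m v)) j t
              = get2 dp j t := fun j t hh => get2_set2_ne _ hh
        have hmv' : get2 (set2 dp (m ||| 2 ^ u) u (get2 dp (m ||| 2 ^ u) u + get2 dp m v)) m v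
            = get2 dp m v := hget_ne m v (Or.inl hj0m)
        obtain ⟨hsh'', hval⟩ := ih _ hndt hltt hsh'
        refine ⟨hsh'', fun j t => ?_⟩
        rw [hval j t, hmv']
        by_cases htu : t = u
        · subst htu
          rw [if_neg (by rintro ⟨hc, _⟩; exact hu_nin hc)]
          by_cases hj : j = m ||| 2 ^ t
          · subst hj
            rw [hget_self, if_pos ⟨List.mem_cons_self, by simpa using hbu, hfv, rfl⟩]
            ring
          · rw [hget_ne _ _ (Or.inl (fun hh => hj hh.symm)),
                if_neg (by rintro ⟨_, _, _, hc⟩; exact hj hc)]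
        · rw [hget_ne j t (Or.inr (fun hh => htu hh.symm))]
          by_cases hmem : t ∈ us
          · have hmc : t ∈ u :: us := List.mem_cons_of_mem u hmem
            by_cases hcond : ¬ m.testBit t ∧ f v t ≠ 0 ∧ j = m ||| 2 ^ t
            · rw [if_pos ⟨hmem, hcond⟩, if_pos ⟨hmc, hcond⟩]
            · rw [if_neg (by rintro ⟨_, hc⟩; exact hcond hc),
                  if_neg (by rintro ⟨_, hc⟩; exact hcond hc)]
          · have hnm : t ∉ u :: us := by
              simp only [List.mem_cons]; push_neg; exact ⟨htu, hmem⟩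
            rw [if_neg (by rintro ⟨hc, _⟩; exact hmem hc),
                if_neg (by rintro ⟨hc, _⟩; exact hnm hc)]
      · rw [if_neg hfv]
        obtain ⟨hsh', hval⟩ := ih dp hndt hltt hsh
        refine ⟨hsh', fun j t => ?_⟩
        rw [hval j t]
        by_cases htu : t = u
        · subst htu
          rw [if_neg (by rintro ⟨hc, _⟩; exact hu_nin hc),
              if_neg (by rintro ⟨_, _, hc, _⟩; exact hfv hc)]
        · by_cases hmem : t ∈ us
          · have hmc : t ∈ u :: us := List.mem_cons_of_mem u hmem
            by_cases hcond : ¬ m.testBit t ∧ f v t ≠ 0 ∧ j = m ||| 2 ^ t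
            · rw [if_pos ⟨hmem, hcond⟩, if_pos ⟨hmc, hcond⟩]
            · rw [if_neg (by rintro ⟨_, hc⟩; exact hcond hc),
                  if_neg (by rintro ⟨_, hc⟩; exact hcond hc)]
          · have hnm : t ∉ u :: us := by
              simp only [List.mem_cons]; push_neg; exact ⟨htu, hmem⟩
            rw [if_neg (by rintro ⟨hc, _⟩; exact hmem hc),
                if_neg (by rintro ⟨hc, _⟩; exact hnm hc)]

theorem pv_foldV (Lk : Nat) (f : Nat → Nat → Int) (m : Nat) (hm : m < 2 ^ Lk) :
    ∀ (vs : List Nat) (dp : List (List Int)), (∀ v ∈ vs, v < Lk) → Shape Lk dp →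
    Shape Lk (vs.foldl (fun dp v =>
        if ¬ m.testBit v ∨ get2 dp m v = 0 then dp
        else (List.range Lk).foldl (fun dp u =>
          if m.testBit u then dp
          else if f v u ≠ 0 then
            set2 dp (m ||| 2 ^ u) u (get2 dp (m ||| 2 ^ u) u + get2 dp m v)
          else dp) dp) dp) ∧
    ∀ j t, get2 (vs.foldl (fun dp v =>
        if ¬ m.testBit v ∨ get2 dp m v = 0 then dp
        else (List.range Lk).foldl (fun dp u =>
          if m.testBit u then dp
          else if f v u ≠ 0 then
            set2 dp (m ||| 2 ^ u) u (get2 dp (m ||| 2 ^ u) u + get2 dp m v)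
          else dp) dp) dp) j t
      = get2 dp j t +
        (if t < Lk ∧ ¬ m.testBit t ∧ j = m ||| 2 ^ t then
          (vs.map (fun v => if m.testBit v ∧ f v t ≠ 0 then get2 dp m v else 0)).sum
        else 0) := by
  intro vs
  induction vs with
  | nil =>
    intro dp _ hsh
    exact ⟨hsh, fun j t => by simp⟩
  | cons v vs ih =>
    intro dp hlt hsh
    have hvLk : v < Lk := hlt v List.mem_cons_self
    have hltt : ∀ x ∈ vs, x < Lk := fun x hx => hlt x (List.mem_cons_of_mem v hx)
    simp only [List.foldl_cons]
    by_cases hskip : ¬ m.testBit v ∨ get2 dp m v = 0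
    · rw [if_pos hskip]
      obtain ⟨hsh', hval⟩ := ih dp hltt hsh
      refine ⟨hsh', fun j t => ?_⟩
      rw [hval j t]
      simp only [List.map_cons, List.sum_cons]
      have hhead : (if m.testBit v ∧ f v t ≠ 0 then get2 dp m v else 0) = 0 := by
        rcases hskip with h | h
        · rw [if_neg (by rintro ⟨hc, _⟩; exact h hc)]
        · by_cases hc : m.testBit v ∧ f v t ≠ 0
          · rw [if_pos hc, h]
          · rw [if_neg hc]
      rw [hhead, zero_add]
    · rw [if_neg hskip]
      have hm1 : m.testBit v = true := by
        by_cases h : m.testBit v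
        · exact h
        · exact absurd (Or.inl h) hskip
      have hm2 : get2 dp m v ≠ 0 := fun h => hskip (Or.inr h)
      obtain ⟨hshU, hvalU⟩ :=
        pv_foldU Lk f m v hm hm1 (List.range Lk) dp List.nodup_range (by simp) hsh
      obtain ⟨hsh', hval⟩ := ih _ hltt hshU
      refine ⟨hsh', fun j t => ?_⟩
      rw [hval j t]
      have hboolne : ∀ t' : Nat, ¬ m.testBit t' → m ≠ m ||| 2 ^ t' := by
        intro t' ht'
        have : m.testBit t' = false := by
          cases h : m.testBit t'
          · rfl
          · exact absurd h ht'
        exact fun hh => pvOrNe m t' this hh.symm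
      have hrowm : ∀ v', get2 (List.foldl (fun dp u =>
          if m.testBit u then dp
          else if f v u ≠ 0 then
            set2 dp (m ||| 2 ^ u) u (get2 dp (m ||| 2 ^ u) u + get2 dp m v)
          else dp) dp (List.range Lk)) m v' = get2 dp m v' := by
        intro v'
        rw [hvalU m v', if_neg (by rintro ⟨_, hnb, _, hj⟩; exact hboolne v' hnb hj), add_zero]
      have hsum : (vs.map (fun v' => if m.testBit v' ∧ f v' t ≠ 0 then
            get2 (List.foldl (fun dp u =>
              if m.testBit u then dp
              else if f v u ≠ 0 then
                set2 dp (m ||| 2 ^ u) u (get2 dp (m ||| 2 ^ u) u + get2 dp m v)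
              else dp) dp (List.range Lk)) m v' else 0)).sum
          = (vs.map (fun v' => if m.testBit v' ∧ f v' t ≠ 0 then get2 dp m v' else 0)).sum := by
        apply pv_sum_congr
        intro v' _
        by_cases hc : m.testBit v' ∧ f v' t ≠ 0
        · rw [if_pos hc, if_pos hc, hrowm v']
        · rw [if_neg hc, if_neg hc]
      rw [hsum, hvalU j t]
      simp only [List.map_cons, List.sum_cons]
      by_cases hC : t < Lk ∧ ¬ m.testBit t ∧ j = m ||| 2 ^ t
      · rw [if_pos hC, if_pos hC]
        by_cases hf : f v t ≠ 0
        · rw [if_pos ⟨List.mem_range.2 hC.1, hC.2.1, hf, hC.2.2⟩, if_pos ⟨hm1, hf⟩]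
          ring
        · rw [if_neg (by rintro ⟨_, _, hc, _⟩; exact hf hc),
              if_neg (by rintro ⟨_, hc⟩; exact hf hc)]
          ring
      · rw [if_neg hC, if_neg hC,
            if_neg (by rintro ⟨ht1, ht2, _, ht4⟩; exact hC ⟨List.mem_range.1 ht1, ht2, ht4⟩)]
        ring

theorem pv_foldM (Lk : Nat) (hLk : 1 ≤ Lk) (f : Nat → Nat → Int) :
    ∀ (K : Nat), K ≤ 2 ^ Lk - 1 →
    ∀ (dp : List (List Int)), Shape Lk dp → (∀ j t, get2 dp j t = Dfun f Lk 0 j t) →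
    ∀ j t, get2 ((List.range' 1 K).foldl (fun dp m =>
        (List.range Lk).foldl (fun dp v =>
          if ¬ m.testBit v ∨ get2 dp m v = 0 then dp
          else (List.range Lk).foldl (fun dp u =>
            if m.testBit u then dp
            else if f v u ≠ 0 then
              set2 dp (m ||| 2 ^ u) u (get2 dp (m ||| 2 ^ u) u + get2 dp m v)
            else dp) dp) dp) dp) j t = Dfun f Lk K j t := by
  suffices hcomb : ∀ (K : Nat), K ≤ 2 ^ Lk - 1 →
      ∀ (dp : List (List Int)), Shape Lk dp → (∀ j t, get2 dp j t = Dfun f Lk 0 j t) →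
      Shape Lk ((List.range' 1 K).foldl (fun dp m =>
        (List.range Lk).foldl (fun dp v =>
          if ¬ m.testBit v ∨ get2 dp m v = 0 then dp
          else (List.range Lk).foldl (fun dp u =>
            if m.testBit u then dp
            else if f v u ≠ 0 then
              set2 dp (m ||| 2 ^ u) u (get2 dp (m ||| 2 ^ u) u + get2 dp m v)
            else dp) dp) dp) dp) ∧
      (∀ j t, get2 ((List.range' 1 K).foldl (fun dp m =>
        (List.range Lk).foldl (fun dp v =>
          if ¬ m.testBit v ∨ get2 dp m v = 0 then dp
          else (List.range Lk).foldl (fun dp u =>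
            if m.testBit u then dp
            else if f v u ≠ 0 then
              set2 dp (m ||| 2 ^ u) u (get2 dp (m ||| 2 ^ u) u + get2 dp m v)
            else dp) dp) dp) dp) j t = Dfun f Lk K j t) by
    intro K hK dp hsh hval
    exact (hcomb K hK dp hsh hval).2
  intro K
  induction K with
  | zero =>
    intro _ dp hsh hval
    exact ⟨hsh, fun j t => by simpa using hval j t⟩
  | succ K ihK =>
    intro hK dp hsh hval
    obtain ⟨hshK, hvalK⟩ := ihK (by omega) dp hsh hval
    rw [List.range'_concat, List.foldl_append, List.foldl_cons, List.foldl_nil, one_mul,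
        Nat.add_comm 1 K]
    have hKlt : K + 1 < 2 ^ Lk := by
      have : 1 ≤ 2 ^ Lk := Nat.one_le_two_pow
      omega
    obtain ⟨hshV, hvalV⟩ :=
      pv_foldV Lk f (K + 1) hKlt (List.range Lk) _ (by simp) hshK
    refine ⟨hshV, fun j t => ?_⟩
    rw [hvalV j t, hvalK j t]
    by_cases hC : t < Lk ∧ ¬ (K + 1).testBit t ∧ j = (K + 1) ||| 2 ^ t
    · rw [if_pos hC]
      have hsum : ((List.range Lk).map (fun v => if (K + 1).testBit v ∧ f v t ≠ 0 then
            get2 ((List.range' 1 K).foldl (fun dp m =>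
              (List.range Lk).foldl (fun dp v =>
                if ¬ m.testBit v ∨ get2 dp m v = 0 then dp
                else (List.range Lk).foldl (fun dp u =>
                  if m.testBit u then dp
                  else if f v u ≠ 0 then
                    set2 dp (m ||| 2 ^ u) u (get2 dp (m ||| 2 ^ u) u + get2 dp m v)
                  else dp) dp) dp) dp) (K + 1) v else 0)).sum
          = pcStep f Lk (K + 1) t := by
        rw [pcStep]
        apply pv_sum_congr
        intro v hv
        by_cases hc : (K + 1).testBit v ∧ f v t ≠ 0
        · rw [if_pos hc, if_pos hc, hvalK (K + 1) v,
              Dfun_eq_pc f Lk K (K + 1) v (List.mem_range.1 hv) hc.1]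
          have := Nat.ge_two_pow_of_testBit hc.1
          have := Nat.two_pow_pos v
          omega
        · rw [if_neg hc, if_neg hc]
      rw [hsum]
      obtain ⟨htLk, hnb, hj⟩ := hC
      have hnbf : (K + 1).testBit t = false := by
        cases h : (K + 1).testBit t
        · rfl
        · exact absurd h hnb
      have htb : j.testBit t = true := by
        rw [hj, Nat.testBit_or, Nat.testBit_two_pow]
        simp
      have hsub : j - 2 ^ t = K + 1 := by rw [hj]; exact pvOrSub (K + 1) t hnbf
      rw [Dfun, if_neg (by rintro ⟨_, _, _, hle⟩; omega),
          Dfun, if_pos ⟨htb, htLk, by omega, by omega⟩, hsub]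
      have hbase : baseD j t = 0 := by
        rw [baseD]
        rw [if_neg (by rintro ⟨hj1, ht0⟩; rw [hj1, ht0] at hsub; simp at hsub)]
      rw [hbase]
      ring
    · rw [if_neg hC, add_zero]
      by_cases hd : j.testBit t ∧ t < Lk ∧ j - 2 ^ t ≠ 0
      · by_cases hb : j - 2 ^ t ≤ K
        · rw [Dfun, if_pos ⟨hd.1, hd.2.1, hd.2.2, hb⟩, Dfun,
              if_pos ⟨hd.1, hd.2.1, hd.2.2, by omega⟩]
        · have hb2 : ¬ j - 2 ^ t ≤ K + 1 := by
            intro hle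
            have heq : j - 2 ^ t = K + 1 := by omega
            have h1 : (K + 1).testBit t = false := heq ▸ pvSubBit j t hd.1
            have h2 : j = (K + 1) ||| 2 ^ t := by
              rw [← heq]; exact (pvSubOr j t hd.1).symm
            exact hC ⟨hd.2.1, by simp [h1], h2⟩
          rw [Dfun, if_neg (by rintro ⟨_, _, _, hle⟩; exact hb hle), Dfun,
              if_neg (by rintro ⟨_, _, _, hle⟩; exact hb2 hle)]
      · rw [Dfun, if_neg (by rintro ⟨h1, h2, h3, _⟩; exact hd ⟨h1, h2, h3⟩), Dfun,
            if_neg (by rintro ⟨h1, h2, h3, _⟩; exact hd ⟨h1, h2, h3⟩)]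

-- ---------- forward path enumerations over position lists ----------
-- gE f k u rem v : paths from u through all of rem (k = |rem|), ending at v
def gE (f : Nat → Nat → Int) : Nat → Nat → List Nat → Nat → Int
  | 0, u, _, v => if u = v then 1 else 0
  | k + 1, u, rem, v =>
    (rem.map (fun w => if f u w ≠ 0 then gE f k w (rem.filter (fun x => x ≠ w)) v else 0)).sum

-- gP f k c rem : paths from c through k vertices of rem, closed by an edge back to node 0
def gP (f : Nat → Nat → Int) : Nat → Nat → List Nat → Int
  | 0, c, _ => if f c 0 ≠ 0 then 1 else 0
  | k + 1, c, rem =>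
    (rem.map (fun w => if f c w ≠ 0 then gP f k w (rem.filter (fun x => x ≠ w)) else 0)).sum

theorem pv_filter_ne_len {α : Type} [DecidableEq α] :
    ∀ (rem : List α), rem.Nodup → ∀ w ∈ rem,
    (rem.filter (fun x => x ≠ w)).length = rem.length - 1 := by
  intro rem
  induction rem with
  | nil => simp
  | cons a l ih =>
    intro hnd w hw
    have hal : a ∉ l := (List.nodup_cons.1 hnd).1
    have hl : l.Nodup := (List.nodup_cons.1 hnd).2
    rw [List.filter_cons]
    by_cases haw : a = w
    · subst haw
      rw [if_neg (by simp)]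
      have hfl : l.filter (fun x => x ≠ a) = l :=
        List.filter_eq_self.2 (fun b hb => by simp; rintro rfl; exact hal hb)
      rw [hfl]; simp
    · rw [if_pos (by simp [haw])]
      have hwl : w ∈ l := by
        rcases List.mem_cons.1 hw with h | h
        · exact absurd h.symm haw
        · exact h
      have h1 : 1 ≤ l.length := List.length_pos_of_mem hwl
      rw [List.length_cons, ih hl w hwl]
      simp
      omega

theorem pv_filter_nodup {α : Type} [DecidableEq α] (rem : List α) (hnd : rem.Nodup) (w : α) :
    (rem.filter (fun x => x ≠ w)).Nodup := List.Nodup.filter _ hnd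

theorem pv_sum_pick {α : Type} [DecidableEq α] :
    ∀ (l : List α), l.Nodup → ∀ w ∈ l, ∀ (g : α → Int),
    (l.map (fun b => if b = w then g b else 0)).sum = g w := by
  intro l
  induction l with
  | nil => simp
  | cons a l ih =>
    intro hnd w hw g
    have hal : a ∉ l := (List.nodup_cons.1 hnd).1
    simp only [List.map_cons, List.sum_cons]
    by_cases haw : a = w
    · subst haw
      rw [if_pos rfl]
      have : (l.map (fun b => if b = a then g b else 0)).sum = 0 := by
        apply List.sum_eq_zero
        intro y hy
        obtain ⟨b, hb, rfl⟩ := List.mem_map.1 hy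
        rw [if_neg (by rintro rfl; exact hal hb)]
      rw [this]; ring
    · rw [if_neg haw]
      have hwl : w ∈ l := by
        rcases List.mem_cons.1 hw with h | h
        · exact absurd h.symm haw
        · exact h
      rw [ih (List.nodup_cons.1 hnd).2 w hwl g]; ring

theorem pv_filter_comm {α : Type} (l : List α) (p q : α → Bool) :
    (l.filter p).filter q = (l.filter q).filter p := by
  rw [List.filter_filter, List.filter_filter]
  apply List.filter_congr
  intro a _
  rw [Bool.and_comm]

theorem gE_zero (f : Nat → Nat → Int) :
    ∀ (k : Nat) (u : Nat) (rem : List Nat) (v : Nat), rem.Nodup → rem.length = k → 1 ≤ k →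
    v ∉ rem → gE f k u rem v = 0 := by
  intro k
  induction k with
  | zero => omega
  | succ k ih =>
    intro u rem v hnd hlen _ hv
    rw [gE]
    apply List.sum_eq_zero
    intro y hy
    obtain ⟨w, hw, rfl⟩ := List.mem_map.1 hy
    by_cases hfw : f u w ≠ 0
    · rw [if_pos hfw]
      cases k with
      | zero =>
        have : rem = [w] := by
          cases rem with
          | nil => simp at hw
          | cons a l =>
            have hl0 : l = [] := by simpa using hlen
            subst hl0
            simp at hw
            simp [hw]
        subst this
        rw [gE]
        have : w ≠ v := by rintro rfl; exact hv hw
        simp [this]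
      | succ k' =>
        apply ih w _ v (pv_filter_nodup rem hnd w)
        · rw [pv_filter_ne_len rem hnd w hw, hlen]
          omega
        · omega
        · intro hmem
          exact hv (List.mem_of_mem_filter hmem)
    · rw [if_neg hfw]

theorem pvBWD (f : Nat → Nat → Int) :
    ∀ (k : Nat) (u : Nat) (rem : List Nat) (v : Nat), rem.Nodup → rem.length = k + 1 →
    v ∈ rem →
    gE f (k + 1) u rem v =
      (if k = 0 then (if f u v ≠ 0 then 1 else 0)
       else ((rem.filter (fun x => x ≠ v)).map (fun w =>
         if f w v ≠ 0 then gE f k u (rem.filter (fun x => x ≠ v)) w else 0)).sum) := by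
  intro k
  induction k with
  | zero =>
    intro u rem v hnd hlen hv
    have hrem : rem = [v] := by
      cases rem with
      | nil => simp at hv
      | cons a l =>
        have hl0 : l = [] := by simpa using hlen
        subst hl0
        simp at hv
        simp [hv]
    subst hrem
    simp [gE]
  | succ k ihk =>
    intro u rem v hnd hlen hv
    rw [if_neg (by omega)]
    rw [show k + 1 + 1 = (k + 1) + 1 from rfl, gE]
    have hndv : (rem.filter (fun x => x ≠ v)).Nodup := pv_filter_nodup rem hnd v
    have hlenv : (rem.filter (fun x => x ≠ v)).length = k + 1 := by
      rw [pv_filter_ne_len rem hnd v hv, hlen]; omega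
    -- the a = v summand vanishes
    have hTv : (fun a => if f u a ≠ 0 then gE f (k + 1) a (rem.filter (fun x => x ≠ a)) v else 0) v
        = 0 := by
      simp only []
      by_cases hfu : f u v ≠ 0
      · rw [if_pos hfu, gE_zero f (k + 1) v (rem.filter (fun x => x ≠ v)) v hndv hlenv
            (by omega) (by simp)]
      · rw [if_neg hfu]
    rw [← pv_sum_drop_zero rem
        (fun a => if f u a ≠ 0 then gE f (k + 1) a (rem.filter (fun x => x ≠ a)) v else 0) v hTv]
    -- rewrite each a ≠ v summand with the inner induction hypothesis
    cases k with
    | zero =>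
      -- rem has two elements; both sides reduce to picking sums
      have hstep : ∀ a ∈ rem.filter (fun x => x ≠ v),
          (if f u a ≠ 0 then gE f 1 a (rem.filter (fun x => x ≠ a)) v else 0)
            = (if f u a ≠ 0 then (if f a v ≠ 0 then 1 else 0) else 0) := by
        intro a ha
        obtain ⟨harem, hav⟩ := List.mem_filter.1 ha
        have hav' : a ≠ v := by simpa using hav
        by_cases hfu : f u a ≠ 0
        · rw [if_pos hfu, if_pos hfu,
              ihk a (rem.filter (fun x => x ≠ a)) v (pv_filter_nodup rem hnd a)
                (by rw [pv_filter_ne_len rem hnd a harem, hlen]; try omega)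
                (List.mem_filter.2 ⟨hv, by simpa using (Ne.symm hav')⟩)]
          simp
        · rw [if_neg hfu, if_neg hfu]
      rw [pv_sum_congr _ _ _ hstep]
      -- now the right-hand side
      have hrhs : ∀ w ∈ rem.filter (fun x => x ≠ v),
          (if f w v ≠ 0 then gE f 1 u (rem.filter (fun x => x ≠ v)) w else 0)
            = (if f w v ≠ 0 then (if f u w ≠ 0 then 1 else 0) else 0) := by
        intro w hw
        by_cases hfw : f w v ≠ 0
        · rw [if_pos hfw, if_pos hfw, gE]
          have : ∀ b ∈ rem.filter (fun x => x ≠ v),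
              (if f u b ≠ 0 then gE f 0 b ((rem.filter (fun x => x ≠ v)).filter (fun x => x ≠ b)) w else 0)
                = (if b = w then (if f u b ≠ 0 then 1 else 0) else 0) := by
            intro b hb
            rw [gE]
            by_cases hbw : b = w
            · subst hbw; simp
            · simp [hbw]
          rw [pv_sum_congr _ _ _ this, pv_sum_pick _ hndv w hw]
        · rw [if_neg hfw, if_neg hfw]
      rw [pv_sum_congr _ _ _ hrhs]
      apply pv_sum_congr
      intro a _
      by_cases h1 : f u a ≠ 0 <;> by_cases h2 : f a v ≠ 0 <;> simp [h1, h2]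
    | succ k' =>
      have hstep : ∀ a ∈ rem.filter (fun x => x ≠ v),
          (if f u a ≠ 0 then gE f (k' + 1 + 1) a (rem.filter (fun x => x ≠ a)) v else 0)
            = (if f u a ≠ 0 then
                (((rem.filter (fun x => x ≠ v)).filter (fun x => x ≠ a)).map (fun w =>
                  if f w v ≠ 0 then
                    gE f (k' + 1) a (((rem.filter (fun x => x ≠ v)).filter (fun x => x ≠ a))) w
                  else 0)).sum else 0) := by
        intro a ha
        obtain ⟨harem, hav⟩ := List.mem_filter.1 ha
        have hav' : a ≠ v := by simpa using hav
        by_cases hfu : f u a ≠ 0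
        · rw [if_pos hfu, if_pos hfu,
              ihk a (rem.filter (fun x => x ≠ a)) v (pv_filter_nodup rem hnd a)
                (by rw [pv_filter_ne_len rem hnd a harem, hlen]; try omega)
                (List.mem_filter.2 ⟨hv, by simpa using (Ne.symm hav')⟩),
              if_neg (by omega)]
          rw [pv_filter_comm rem (fun x => x ≠ a) (fun x => x ≠ v)]
        · rw [if_neg hfu, if_neg hfu]
      rw [pv_sum_congr _ _ _ hstep]
      -- expand the right-hand side one step and drop its diagonal
      have hrhs : ∀ w ∈ rem.filter (fun x => x ≠ v),
          (if f w v ≠ 0 then gE f (k' + 1 + 1) u (rem.filter (fun x => x ≠ v)) w else 0)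
            = (if f w v ≠ 0 then
                (((rem.filter (fun x => x ≠ v)).filter (fun x => x ≠ w)).map (fun a =>
                  if f u a ≠ 0 then
                    gE f (k' + 1) a (((rem.filter (fun x => x ≠ v)).filter (fun x => x ≠ a))) w
                  else 0)).sum else 0) := by
        intro w hw
        by_cases hfw : f w v ≠ 0
        · rw [if_pos hfw, if_pos hfw, gE]
          have hdiag : (fun a => if f u a ≠ 0 then
              gE f (k' + 1) a ((rem.filter (fun x => x ≠ v)).filter (fun x => x ≠ a)) w else 0) w
              = 0 := by
            simp only []
            by_cases hfu : f u w ≠ 0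
            · rw [if_pos hfu,
                  gE_zero f (k' + 1) w ((rem.filter (fun x => x ≠ v)).filter (fun x => x ≠ w)) w
                    (pv_filter_nodup _ hndv w)
                    (by rw [pv_filter_ne_len _ hndv w hw, hlenv]; omega)
                    (by omega)
                    (by simp)]
            · rw [if_neg hfu]
          rw [← pv_sum_drop_zero (rem.filter (fun x => x ≠ v))
              (fun a => if f u a ≠ 0 then
                gE f (k' + 1) a ((rem.filter (fun x => x ≠ v)).filter (fun x => x ≠ a)) w else 0)
              w hdiag]
        · rw [if_neg hfw, if_neg hfw]
      rw [pv_sum_congr _ _ _ hrhs]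
      -- both sides are sums over ordered distinct pairs of rem \ v : swap
      have hL : ∀ a ∈ rem.filter (fun x => x ≠ v),
          (if f u a ≠ 0 then
            (((rem.filter (fun x => x ≠ v)).filter (fun x => x ≠ a)).map (fun w =>
              if f w v ≠ 0 then
                gE f (k' + 1) a (((rem.filter (fun x => x ≠ v)).filter (fun x => x ≠ a))) w
              else 0)).sum else 0)
          = (((rem.filter (fun x => x ≠ v)).filter (fun x => x ≠ a)).map (fun w =>
              if f u a ≠ 0 then if f w v ≠ 0 then
                gE f (k' + 1) a (((rem.filter (fun x => x ≠ v)).filter (fun x => x ≠ a))) w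
              else 0 else 0)).sum := by
        intro a _
        by_cases hfu : f u a ≠ 0
        · rw [if_pos hfu]
          apply pv_sum_congr
          intro w _
          rw [if_pos hfu]
        · rw [if_neg hfu]
          symm
          apply List.sum_eq_zero
          intro y hy
          obtain ⟨w, hwmem, rfl⟩ := List.mem_map.1 hy
          rw [if_neg hfu]
      have hR : ∀ w ∈ rem.filter (fun x => x ≠ v),
          (if f w v ≠ 0 then
            (((rem.filter (fun x => x ≠ v)).filter (fun x => x ≠ w)).map (fun a =>
              if f u a ≠ 0 then
                gE f (k' + 1) a (((rem.filter (fun x => x ≠ v)).filter (fun x => x ≠ a))) w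
              else 0)).sum else 0)
          = (((rem.filter (fun x => x ≠ v)).filter (fun x => x ≠ w)).map (fun a =>
              if f u a ≠ 0 then if f w v ≠ 0 then
                gE f (k' + 1) a (((rem.filter (fun x => x ≠ v)).filter (fun x => x ≠ a))) w
              else 0 else 0)).sum := by
        intro w _
        by_cases hfw : f w v ≠ 0
        · rw [if_pos hfw]
          apply pv_sum_congr
          intro a _
          by_cases hfu : f u a ≠ 0
          · rw [if_pos hfu, if_pos hfu, if_pos hfw]
          · rw [if_neg hfu, if_neg hfu]
        · rw [if_neg hfw]
          symm
          apply List.sum_eq_zero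
          intro y hy
          obtain ⟨a, hamem, rfl⟩ := List.mem_map.1 hy
          by_cases hfu : f u a ≠ 0
          · rw [if_pos hfu, if_neg hfw]
          · rw [if_neg hfu]
      rw [pv_sum_congr _ _ _ hL, pv_sum_congr _ _ _ hR]
      exact pv_pairswap (rem.filter (fun x => x ≠ v)) hndv
        (fun a w => if f u a ≠ 0 then if f w v ≠ 0 then
          gE f (k' + 1) a (((rem.filter (fun x => x ≠ v)).filter (fun x => x ≠ a))) w
        else 0 else 0)

theorem pv_pc_zero (f : Nat → Nat → Int) (Lk : Nat) :
    ∀ (m v : Nat), m.testBit 0 = false → pc f Lk m v = 0 := by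
  intro m
  induction m using Nat.strong_induction_on with
  | _ m ih =>
    intro v h0
    by_cases hb : m.testBit v
    · have hv0 : v ≠ 0 := by rintro rfl; rw [h0] at hb; exact absurd hb (by simp)
      by_cases hs : m - 2 ^ v = 0
      · rw [pc_singleton f Lk m v hb hs, if_neg hv0]
      · rw [pc_eq f Lk m v hb hs, pcStep]
        apply List.sum_eq_zero
        intro y hy
        obtain ⟨u, hu, rfl⟩ := List.mem_map.1 hy
        by_cases hc : (m - 2 ^ v).testBit u ∧ f u v ≠ 0
        · rw [if_pos hc]
          have hlt : m - 2 ^ v < m := by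
            have := Nat.ge_two_pow_of_testBit hb
            have := Nat.two_pow_pos v
            omega
          exact ih (m - 2 ^ v) hlt u (by rw [pvSubBitNe m v 0 hb (Ne.symm hv0)]; exact h0)
        · rw [if_neg hc]
    · rw [pc]
      simp [hb]

theorem pv_sum_filter {α : Type} (l : List α) (p : α → Bool) (Q : α → Prop)
    [DecidablePred Q] (g : α → Int) :
    (l.map (fun u => if p u = true ∧ Q u then g u else 0)).sum
      = ((l.filter p).map (fun u => if Q u then g u else 0)).sum := by
  induction l with
  | nil => simp
  | cons a l ih =>
    rw [List.filter_cons]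
    by_cases hp : p a = true
    · rw [if_pos hp]
      simp only [List.map_cons, List.sum_cons, ih]
      by_cases hq : Q a
      · rw [if_pos ⟨hp, hq⟩, if_pos hq]
      · rw [if_neg (by rintro ⟨_, hc⟩; exact hq hc), if_neg hq]
    · rw [if_neg hp]
      simp only [List.map_cons, List.sum_cons, ih]
      rw [if_neg (by rintro ⟨hc, _⟩; exact hp hc)]
      ring

theorem pc_at_zero (f : Nat → Nat → Int) (Lk : Nat) (m : Nat) (h0 : m.testBit 0 = true)
    (hne : m ≠ 1) : pc f Lk m 0 = 0 := by
  have hs : m - 2 ^ 0 ≠ 0 := by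
    have := Nat.ge_two_pow_of_testBit h0
    simp at this ⊢
    omega
  rw [pc_eq f Lk m 0 h0 hs, pcStep]
  apply List.sum_eq_zero
  intro y hy
  obtain ⟨u, hu, rfl⟩ := List.mem_map.1 hy
  by_cases hc : (m - 2 ^ 0).testBit u ∧ f u 0 ≠ 0
  · rw [if_pos hc, pv_pc_zero f Lk (m - 2 ^ 0) u (pvSubBit m 0 h0)]
  · rw [if_neg hc]

theorem pvRLfilter (Lk : Nat) (m v : Nat) (hv : m.testBit v = true) (hv0 : v ≠ 0) :
    ((List.range Lk).filter (fun i => m.testBit i && !(i == 0))).filter (fun x => x ≠ v)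
      = (List.range Lk).filter (fun i => (m - 2 ^ v).testBit i && !(i == 0)) := by
  rw [List.filter_filter]
  apply List.filter_congr
  intro i _
  by_cases hiv : i = v
  · subst hiv
    simp [pvSubBit m i hv]
  · simp [pvSubBitNe m v i hv hiv, hiv]

theorem pvPCGE (f : Nat → Nat → Int) (Lk : Nat) (hLk : 0 < Lk) :
    ∀ (m v : Nat), m < 2 ^ Lk → m.testBit 0 = true → m.testBit v = true → v ≠ 0 → v < Lk →
    pc f Lk m v =
      gE f ((List.range Lk).filter (fun i => m.testBit i && !(i == 0))).length 0
        ((List.range Lk).filter (fun i => m.testBit i && !(i == 0))) v := by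
  intro m
  induction m using Nat.strong_induction_on with
  | _ m ih =>
    intro v hmLk h0 hv hv0 hvLk
    have hpow := Nat.ge_two_pow_of_testBit hv
    have hpos := Nat.two_pow_pos v
    by_cases hs : m - 2 ^ v = 0
    · exfalso
      have hm2 : m = 2 ^ v := by omega
      rw [hm2, Nat.testBit_two_pow] at h0
      simp at h0
      exact hv0 h0
    · have hmlt : m - 2 ^ v < m := by omega
      have h0' : (m - 2 ^ v).testBit 0 = true := by
        rw [pvSubBitNe m v 0 hv (Ne.symm hv0)]; exact h0
      have hvRL : v ∈ (List.range Lk).filter (fun i => m.testBit i && !(i == 0)) :=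
        List.mem_filter.2 ⟨List.mem_range.2 hvLk, by simp [hv, hv0]⟩
      have hndRL : ((List.range Lk).filter (fun i => m.testBit i && !(i == 0))).Nodup :=
        List.Nodup.filter _ List.nodup_range
      have hRLne : ((List.range Lk).filter (fun i => m.testBit i && !(i == 0))).length ≠ 0 := by
        intro hc
        rw [List.length_eq_zero_iff.1 hc] at hvRL
        simp at hvRL
      obtain ⟨kk, hkk⟩ : ∃ kk, ((List.range Lk).filter
          (fun i => m.testBit i && !(i == 0))).length = kk + 1 := by
        cases hL : ((List.range Lk).filter (fun i => m.testBit i && !(i == 0))).length with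
        | zero => exact absurd hL hRLne
        | succ kk => exact ⟨kk, rfl⟩
      rw [hkk, pvBWD f kk 0 _ v hndRL hkk hvRL,
          pvRLfilter Lk m v hv hv0]
      rw [pc_eq f Lk m v hv hs, pcStep]
      have hlenRL' : ((List.range Lk).filter
          (fun i => (m - 2 ^ v).testBit i && !(i == 0))).length = kk := by
        have := pv_filter_ne_len _ hndRL v hvRL
        rw [hkk] at this
        rw [← pvRLfilter Lk m v hv hv0, this]
        omega
      by_cases hkk0 : kk = 0
      · subst hkk0
        rw [if_pos rfl]
        -- the reduced mask is exactly 1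
        have hm1 : m - 2 ^ v = 1 := by
          apply Nat.eq_of_testBit_eq
          intro i
          by_cases hi0 : i = 0
          · subst hi0; rw [h0']; simp
          · have : (1 : Nat).testBit i = false := by
              have : (1 : Nat) < 2 ^ i := by
                have : 1 ≤ i := by omega
                calc (1 : Nat) < 2 ^ 1 := by norm_num
                _ ≤ 2 ^ i := Nat.pow_le_pow_right (by norm_num) this
              exact Nat.testBit_lt_two_pow this
            rw [this]
            by_cases hiLk : i < Lk
            · by_contra hcon
              have hmem : i ∈ (List.range Lk).filter
                  (fun j => (m - 2 ^ v).testBit j && !(j == 0)) := by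
                apply List.mem_filter.2
                refine ⟨List.mem_range.2 hiLk, ?_⟩
                simp [hi0]
                cases hbi : (m - 2 ^ v).testBit i
                · exact absurd hbi hcon
                · rfl
              rw [List.length_eq_zero_iff.1 hlenRL'] at hmem
              simp at hmem
            · apply Nat.testBit_lt_two_pow
              calc m - 2 ^ v ≤ m := by omega
              _ < 2 ^ Lk := hmLk
              _ ≤ 2 ^ i := Nat.pow_le_pow_right (by norm_num) (by omega)
        rw [hm1]
        have hterm : ∀ u ∈ List.range Lk,
            (if (1 : Nat).testBit u ∧ f u v ≠ 0 then pc f Lk 1 u else 0)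
              = (if u = 0 then (if f u v ≠ 0 then 1 else 0) else 0) := by
          intro u _
          by_cases hu0 : u = 0
          · subst hu0
            have hpc1 : pc f Lk 1 0 = 1 := by
              rw [pc_singleton f Lk 1 0 (by simp) (by simp)]; simp
            by_cases hf : f 0 v ≠ 0
            · rw [if_pos ⟨by simp, hf⟩, hpc1, if_pos rfl, if_pos hf]
            · rw [if_neg (by rintro ⟨_, hc⟩; exact hf hc), if_pos rfl, if_neg hf]
          · have hb1 : (1 : Nat).testBit u = false := by
              rw [show (1 : Nat) = 2 ^ 0 by norm_num, Nat.testBit_two_pow]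
              simp [Ne.symm hu0]
            rw [if_neg (by rintro ⟨hc, _⟩; rw [hb1] at hc; simp at hc), if_neg hu0]
        rw [pv_sum_congr _ _ _ hterm,
            pv_sum_pick (List.range Lk) List.nodup_range 0 (List.mem_range.2 hLk)]
      · rw [if_neg hkk0]
        -- right side: apply the induction hypothesis to each endpoint w
        have hrw : ∀ w ∈ (List.range Lk).filter (fun i => (m - 2 ^ v).testBit i && !(i == 0)),
            (if f w v ≠ 0 then gE f kk 0
              ((List.range Lk).filter (fun i => (m - 2 ^ v).testBit i && !(i == 0))) w else 0)
              = (if f w v ≠ 0 then pc f Lk (m - 2 ^ v) w else 0) := by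
          intro w hwmem
          obtain ⟨hwr, hwp⟩ := List.mem_filter.1 hwmem
          have hwb : (m - 2 ^ v).testBit w = true := by
            cases hb : (m - 2 ^ v).testBit w
            · rw [hb] at hwp; simp at hwp
            · rfl
          have hw0 : w ≠ 0 := by
            intro hc; subst hc; simp at hwp
          by_cases hf : f w v ≠ 0
          · rw [if_pos hf, if_pos hf, ← hlenRL',
                ih (m - 2 ^ v) hmlt w (by omega) h0' hwb hw0 (List.mem_range.1 hwr)]
          · rw [if_neg hf, if_neg hf]
        rw [pv_sum_congr _ _ _ hrw]
        -- left side: zero the u = 0 term and restrict the range to the filtered list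
        have hm1' : m - 2 ^ v ≠ 1 := by
          intro hc
          have : ((List.range Lk).filter
              (fun i => (m - 2 ^ v).testBit i && !(i == 0))).length = 0 := by
            rw [List.length_eq_zero_iff]
            apply List.filter_eq_nil_iff.2
            intro i _
            rw [hc]
            by_cases hi0 : i = 0
            · subst hi0; simp
            · have : (1 : Nat).testBit i = false := by
                apply Nat.testBit_lt_two_pow
                calc (1 : Nat) < 2 ^ 1 := by norm_num
                _ ≤ 2 ^ i := Nat.pow_le_pow_right (by norm_num) (by omega)
              simp [this]
          omega
        have hterm : ∀ u ∈ List.range Lk,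
            (if (m - 2 ^ v).testBit u ∧ f u v ≠ 0 then pc f Lk (m - 2 ^ v) u else 0)
              = (if ((m - 2 ^ v).testBit u && !(u == 0)) = true ∧ f u v ≠ 0 then
                  pc f Lk (m - 2 ^ v) u else 0) := by
          intro u _
          by_cases hu0 : u = 0
          · subst hu0
            by_cases hc : (m - 2 ^ v).testBit 0 ∧ f 0 v ≠ 0
            · rw [if_pos hc, if_neg (by rintro ⟨hcc, _⟩; simp at hcc),
                  pc_at_zero f Lk (m - 2 ^ v) h0' hm1']
            · rw [if_neg hc, if_neg (by rintro ⟨hcc, _⟩; simp at hcc)]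
          · by_cases hb : (m - 2 ^ v).testBit u
            · simp [hb, hu0]
            · simp [hb]
        rw [pv_sum_congr _ _ _ hterm,
            pv_sum_filter (List.range Lk) (fun i => (m - 2 ^ v).testBit i && !(i == 0))
              (fun u => f u v ≠ 0) (fun u => pc f Lk (m - 2 ^ v) u)]

theorem pvSUMEND (f : Nat → Nat → Int) :
    ∀ (k : Nat) (c : Nat) (rem : List Nat), rem.Nodup → rem.length = k → 1 ≤ k →
    gP f k c rem = (rem.map (fun v => if f v 0 ≠ 0 then gE f k c rem v else 0)).sum := by
  intro k
  induction k with
  | zero => omega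
  | succ k ih =>
    intro c rem hnd hlen _
    cases k with
    | zero =>
      obtain ⟨a, rfl⟩ : ∃ a, rem = [a] := by
        cases rem with
        | nil => simp at hlen
        | cons a l =>
          have : l = [] := by simpa using hlen
          exact ⟨a, by rw [this]⟩
      by_cases h1 : f c a ≠ 0 <;> by_cases h2 : f a 0 ≠ 0 <;>
        simp [gP, gE, h1, h2, List.filter_cons] <;> split_ifs <;> simp_all
    | succ k' =>
      rw [gP]
      have hstep : ∀ w ∈ rem,
          (if f c w ≠ 0 then gP f (k' + 1) w (rem.filter (fun x => x ≠ w)) else 0)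
            = (if f c w ≠ 0 then ((rem.filter (fun x => x ≠ w)).map (fun v =>
                if f v 0 ≠ 0 then gE f (k' + 1) w (rem.filter (fun x => x ≠ w)) v else 0)).sum
              else 0) := by
        intro w hw
        by_cases hf : f c w ≠ 0
        · rw [if_pos hf, if_pos hf,
              ih w (rem.filter (fun x => x ≠ w)) (pv_filter_nodup rem hnd w)
                (by rw [pv_filter_ne_len rem hnd w hw, hlen]; omega) (by omega)]
        · rw [if_neg hf, if_neg hf]
      rw [pv_sum_congr _ _ _ hstep]
      have hrhs : ∀ v ∈ rem,
          (if f v 0 ≠ 0 then gE f (k' + 1 + 1) c rem v else 0)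
            = ((rem.map (fun w => if f v 0 ≠ 0 then
                (if f c w ≠ 0 then gE f (k' + 1) w (rem.filter (fun x => x ≠ w)) v else 0)
              else 0)).sum) := by
        intro v _
        by_cases hf : f v 0 ≠ 0
        · rw [if_pos hf, gE]
          apply pv_sum_congr
          intro w _
          rw [if_pos hf]
        · rw [if_neg hf]
          symm
          apply List.sum_eq_zero
          intro y hy
          obtain ⟨w, _, rfl⟩ := List.mem_map.1 hy
          rw [if_neg hf]
      rw [pv_sum_congr _ _ _ hrhs, pv_sum_sum_comm rem rem
          (fun v w => if f v 0 ≠ 0 then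
            (if f c w ≠ 0 then gE f (k' + 1) w (rem.filter (fun x => x ≠ w)) v else 0)
          else 0)]
      apply pv_sum_congr
      intro w hw
      have hdiag : (fun v => if f v 0 ≠ 0 then
          (if f c w ≠ 0 then gE f (k' + 1) w (rem.filter (fun x => x ≠ w)) v else 0)
          else 0) w = 0 := by
        simp only []
        by_cases h1 : f w 0 ≠ 0
        · rw [if_pos h1]
          by_cases h2 : f c w ≠ 0
          · rw [if_pos h2, gE_zero f (k' + 1) w (rem.filter (fun x => x ≠ w)) w
                (pv_filter_nodup rem hnd w)
                (by rw [pv_filter_ne_len rem hnd w hw, hlen]; omega) (by omega) (by simp)]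
          · rw [if_neg h2]
        · rw [if_neg h1]
      rw [← pv_sum_drop_zero rem
          (fun v => if f v 0 ≠ 0 then
            (if f c w ≠ 0 then gE f (k' + 1) w (rem.filter (fun x => x ≠ w)) v else 0)
            else 0) w hdiag]
      by_cases h2 : f c w ≠ 0
      · rw [if_pos h2]
        apply pv_sum_congr
        intro v _
        by_cases h1 : f v 0 ≠ 0
        · rw [if_pos h1, if_pos h1, if_pos h2]
        · rw [if_neg h1, if_neg h1]
      · rw [if_neg h2]
        symm
        apply List.sum_eq_zero
        intro y hy
        obtain ⟨v, _, rfl⟩ := List.mem_map.1 hy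
        by_cases h1 : f v 0 ≠ 0
        · rw [if_pos h1, if_neg h2]
        · rw [if_neg h1]

-- ---------- combinations facts ----------
theorem combosA_length : ∀ (l : List Int) (k : Nat) (S : List Int),
    S ∈ combosA l k → S.length = k := by
  intro l
  induction l with
  | nil => intro k S hS; cases k <;> simp [combosA] at hS <;> simp [hS]
  | cons x xs ih =>
    intro k S hS
    cases k with
    | zero => simp [combosA] at hS; simp [hS]
    | succ k =>
      rw [combosA, List.mem_append] at hS
      rcases hS with hS | hS
      · obtain ⟨T, hT, rfl⟩ := List.mem_map.1 hS
        simp [ih k T hT]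
      · exact ih (k + 1) S hS

theorem combosA_sublist : ∀ (l : List Int) (k : Nat) (S : List Int),
    S ∈ combosA l k → S.Sublist l := by
  intro l
  induction l with
  | nil => intro k S hS; cases k <;> simp [combosA] at hS <;> simp [hS]
  | cons x xs ih =>
    intro k S hS
    cases k with
    | zero => simp [combosA] at hS; simp [hS]
    | succ k =>
      rw [combosA, List.mem_append] at hS
      rcases hS with hS | hS
      · obtain ⟨T, hT, rfl⟩ := List.mem_map.1 hS
        exact List.Sublist.cons₂ x (ih k T hT)
      · exact List.Sublist.cons x (ih (k + 1) S hS)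

theorem combosA_nil_of_lt : ∀ (l : List Int) (k : Nat), l.length < k → combosA l k = [] := by
  intro l
  induction l with
  | nil => intro k hk; cases k with
    | zero => omega
    | succ k => rfl
  | cons x xs ih =>
    intro k hk
    cases k with
    | zero => omega
    | succ k =>
      rw [combosA, ih k (by simp at hk; omega), ih (k + 1) (by simp at hk; omega)]
      simp

-- ---------- the subset/sequence exchange and the master counting lemma ----------
def wSum (A : List (List Int)) (s v : Int) (rem : List Int) (k : Nat) : Int :=
  (rem.map (fun w => if pvGet2 A v w ≠ 0 then waysB A s w (rem.filter (fun x => x ≠ w)) k else 0)).sum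

theorem waysB_succ (A : List (List Int)) (s v : Int) (rem : List Int) (k : Nat)
    (h : k + 1 ≤ rem.length) :
    waysB A s v rem (k + 1) = wSum A s v rem k := by
  rw [waysB, if_neg (by omega), wSum,
      pv_foldl_if_add rem (fun w => pvGet2 A v w ≠ 0)
        (fun w => waysB A s w (rem.filter (fun x => x ≠ w)) k) 0]
  simp

theorem pvEXCH : ∀ (rem : List Int), rem.Nodup → ∀ (k : Nat) (F : Int → List Int → Int),
    ((combosA rem (k + 1)).map (fun S =>
      (S.map (fun w => F w (S.filter (fun x => x ≠ w)))).sum)).sum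
    = (rem.map (fun w => ((combosA (rem.filter (fun x => x ≠ w)) k).map (F w)).sum)).sum := by
  intro rem
  induction rem with
  | nil =>
    intro _ k F
    show ((combosA [] (k + 1)).map _).sum = _
    simp [combosA]
  | cons x xs ih =>
    intro hnd k F
    have hx : x ∉ xs := (List.nodup_cons.1 hnd).1
    have hndx : xs.Nodup := (List.nodup_cons.1 hnd).2
    have hcons : combosA (x :: xs) (k + 1)
        = (combosA xs k).map (fun S => x :: S) ++ combosA xs (k + 1) := rfl
    rw [hcons, List.map_append, List.sum_append, List.map_map]
    have hfilxs : (x :: xs).filter (fun y => y ≠ x) = xs := by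
      rw [List.filter_cons, if_neg (by simp)]
      exact List.filter_eq_self.2 (fun b hb => by simp; rintro rfl; exact hx hb)
    have hfilw : ∀ w ∈ xs, (x :: xs).filter (fun y => y ≠ w) = x :: xs.filter (fun y => y ≠ w) := by
      intro w hw
      rw [List.filter_cons, if_pos (by simp; rintro rfl; exact hx hw)]
    have hchunk1 : ∀ S' ∈ combosA xs k,
        (((x :: S').map (fun w => F w ((x :: S').filter (fun y => y ≠ w)))).sum)
          = F x S' + (S'.map (fun w => F w (x :: S'.filter (fun y => y ≠ w)))).sum := by
      intro S' hS'
      have hsub := combosA_sublist xs k S' hS'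
      have hxS : x ∉ S' := fun hc => hx (hsub.subset hc)
      simp only [List.map_cons, List.sum_cons]
      congr 1
      · rw [List.filter_cons, if_neg (by simp)]
        rw [List.filter_eq_self.2 (fun b hb => by simp; rintro rfl; exact hxS hb)]
      · apply pv_sum_congr
        intro w hw
        rw [List.filter_cons, if_pos (by simp; rintro rfl; exact hxS hw)]
    have hmapped : ((combosA xs k).map (fun S' =>
        ((x :: S').map (fun w => F w ((x :: S').filter (fun y => y ≠ w)))).sum)).sum
        = ((combosA xs k).map (fun S' =>
            F x S' + (S'.map (fun w => F w (x :: S'.filter (fun y => y ≠ w)))).sum)).sum :=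
      pv_sum_congr _ _ _ hchunk1
    rw [show ((combosA xs k).map ((fun S => (S.map
          (fun w => F w (S.filter (fun y => y ≠ w)))).sum) ∘ (fun S => x :: S))).sum
        = ((combosA xs k).map (fun S' =>
            ((x :: S').map (fun w => F w ((x :: S').filter (fun y => y ≠ w)))).sum)).sum from rfl,
        hmapped, List.sum_map_add, ih hndx k F]
    simp only [List.map_cons, List.sum_cons]
    rw [hfilxs]
    have htail : ∀ w ∈ xs, ((combosA ((x :: xs).filter (fun y => y ≠ w)) k).map (F w)).sum
        = ((combosA (x :: xs.filter (fun y => y ≠ w)) k).map (F w)).sum := by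
      intro w hw
      rw [hfilw w hw]
    rw [pv_sum_congr _ _ _ htail]
    have hmain : ((combosA xs k).map (fun S' =>
          (S'.map (fun w => F w (x :: S'.filter (fun y => y ≠ w)))).sum)).sum
        + (xs.map (fun w => ((combosA (xs.filter (fun y => y ≠ w)) k).map (F w)).sum)).sum
        = (xs.map (fun w => ((combosA (x :: xs.filter (fun y => y ≠ w)) k).map (F w)).sum)).sum := by
      cases k with
      | zero =>
        have hx0 : combosA xs 0 = [[]] := by cases xs <;> rfl
        have h1 : ((combosA xs 0).map (fun S' =>
            (S'.map (fun w => F w (x :: S'.filter (fun y => y ≠ w)))).sum)).sum = 0 := by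
          rw [hx0]; simp
        rw [h1, zero_add]
        apply pv_sum_congr
        intro w _
        rw [show combosA (x :: xs.filter (fun y => y ≠ w)) 0 = [[]] from rfl,
            show combosA (xs.filter (fun y => y ≠ w)) 0 = [[]] from
              (by cases h : xs.filter (fun y => y ≠ w) <;> rfl)]
      | succ j =>
        have hsplit : ∀ w ∈ xs, ((combosA (x :: xs.filter (fun y => y ≠ w)) (j + 1)).map (F w)).sum
            = ((combosA (xs.filter (fun y => y ≠ w)) j).map (fun T => F w (x :: T))).sum
              + ((combosA (xs.filter (fun y => y ≠ w)) (j + 1)).map (F w)).sum := by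
          intro w _
          have : combosA (x :: xs.filter (fun y => y ≠ w)) (j + 1)
              = (combosA (xs.filter (fun y => y ≠ w)) j).map (fun S => x :: S)
                ++ combosA (xs.filter (fun y => y ≠ w)) (j + 1) := rfl
          rw [this, List.map_append, List.sum_append, List.map_map]
          rfl
        rw [pv_sum_congr _ _ _ hsplit, List.sum_map_add]
        congr 1
        exact ih hndx j (fun w T => F w (x :: T))
    rw [← hmain]
    ring

theorem pvKEY (A : List (List Int)) (s : Int) :
    ∀ (k : Nat) (v : Int) (rem : List Int), rem.Nodup →
    waysB A s v rem k = ((combosA rem k).map (fun S => waysB A s v S S.length)).sum := by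
  intro k
  induction k with
  | zero =>
    intro v rem hnd
    rw [show combosA rem 0 = [[]] from by cases rem <;> rfl]
    simp [waysB]
  | succ k ih =>
    intro v rem hnd
    by_cases hlen : rem.length < k + 1
    · rw [combosA_nil_of_lt rem (k + 1) hlen, waysB, if_pos hlen]
      simp
    · push_neg at hlen
      rw [waysB_succ A s v rem k (by omega), wSum]
      have hstep : ∀ w ∈ rem,
          (if pvGet2 A v w ≠ 0 then waysB A s w (rem.filter (fun x => x ≠ w)) k else 0)
            = ((combosA (rem.filter (fun x => x ≠ w)) k).map (fun T =>
                if pvGet2 A v w ≠ 0 then waysB A s w T T.length else 0)).sum := by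
        intro w hw
        by_cases hf : pvGet2 A v w ≠ 0
        · rw [if_pos hf, ih w _ (pv_filter_nodup rem hnd w)]
          apply pv_sum_congr
          intro T _
          rw [if_pos hf]
        · rw [if_neg hf]
          symm
          apply List.sum_eq_zero
          intro y hy
          obtain ⟨T, _, rfl⟩ := List.mem_map.1 hy
          rw [if_neg hf]
      rw [pv_sum_congr _ _ _ hstep]
      have hrhs : ∀ S ∈ combosA rem (k + 1),
          waysB A s v S S.length = (S.map (fun w =>
            (if pvGet2 A v w ≠ 0 then
              waysB A s w (S.filter (fun x => x ≠ w)) (S.filter (fun x => x ≠ w)).length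
            else 0))).sum := by
        intro S hS
        have hSlen := combosA_length rem (k + 1) S hS
        have hSnd : S.Nodup := (combosA_sublist rem (k + 1) S hS).nodup hnd
        rw [hSlen, waysB_succ A s v S k (by omega), wSum]
        apply pv_sum_congr
        intro w hw
        by_cases hf : pvGet2 A v w ≠ 0
        · rw [if_pos hf, if_pos hf]
          congr 1
          rw [pv_filter_ne_len S hSnd w hw, hSlen]
          omega
        · rw [if_neg hf, if_neg hf]
      rw [pv_sum_congr _ _ _ hrhs,
          pvEXCH rem hnd k (fun w T => if pvGet2 A v w ≠ 0 then waysB A s w T T.length else 0)]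

-- ---------- per-subset chain ----------
theorem pv_map_getD_range' (l : List Int) (d : Int) :
    (List.range' 1 (l.length - 1)).map (fun i => l.getD i d) = l.drop 1 := by
  apply List.ext_getElem
  · simp
  · intro i h1 h2
    simp only [List.getElem_map, List.getElem_range', List.getElem_drop]
    rw [List.getD_eq_getElem?_getD]
    rw [List.getElem?_eq_getElem (by simp at h1 ⊢; omega)]
    simp [Nat.add_comm]

theorem pvMAPg (A : List (List Int)) (vp : Nat → Int) (f : Nat → Nat → Int) (Lk : Nat)
    (hf : ∀ i j, i < Lk → j < Lk → f i j = pvGet2 A (vp i) (vp j))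
    (hinj : ∀ q1 q2, q1 < Lk → q2 < Lk → vp q1 = vp q2 → q1 = q2) :
    ∀ (k : Nat) (c : Nat) (ps : List Nat), ps.Nodup → c < Lk → (∀ q ∈ ps, q < Lk) →
    k ≤ ps.length →
    gP f k c ps = waysB A (vp 0) (vp c) (ps.map vp) k := by
  intro k
  induction k with
  | zero =>
    intro c ps _ hc _ _
    rw [gP, waysB, hf c 0 hc (by omega)]
  | succ k ih =>
    intro c ps hnd hc hq hk
    rw [gP, waysB, if_neg (by rw [List.length_map]; omega),
        pv_foldl_if_add (ps.map vp) (fun w => pvGet2 A (vp c) w ≠ 0)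
          (fun w => waysB A (vp 0) w ((ps.map vp).filter (fun x => x ≠ w)) k) 0,
        zero_add, List.map_map]
    apply pv_sum_congr
    intro w hw
    have hwLk : w < Lk := hq w hw
    simp only [Function.comp]
    rw [hf c w hc hwLk]
    by_cases hfc : pvGet2 A (vp c) (vp w) ≠ 0
    · rw [if_pos hfc, if_pos hfc]
      have hfilmap : (ps.map vp).filter (fun x => x ≠ vp w)
          = (ps.filter (fun x => x ≠ w)).map vp := by
        rw [List.filter_map]
        congr 1
        apply List.filter_congr
        intro q hq'
        simp only [Function.comp]
        by_cases hqw : q = w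
        · subst hqw; simp
        · have : vp q ≠ vp w := fun hcon => hqw (hinj q w (hq q hq') hwLk hcon)
          simp [hqw, this]
      rw [hfilmap,
          ih w (ps.filter (fun x => x ≠ w)) (pv_filter_nodup ps hnd w) hwLk
            (fun q hq' => hq q (List.mem_of_mem_filter hq'))
            (by rw [pv_filter_ne_len ps hnd w hw]; omega)]
    · rw [if_neg hfc, if_neg hfc]

theorem pv_get2_matrix (g : Nat → Nat → Int) (n i j : Nat) (hi : i < n) (hj : j < n) :
    get2 ((List.range n).map (fun a => (List.range n).map (fun b => g a b))) i j = g i j := by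
  unfold get2
  simp [List.getD_eq_getElem?_getD, List.getElem?_map, List.getElem?_range, hi, hj]

theorem pv_get2_replicate (n m j t : Nat) :
    get2 (List.replicate n (List.replicate m (0 : Int))) j t = 0 := by
  unfold get2
  simp only [List.getD_eq_getElem?_getD, List.getElem?_replicate]
  split_ifs <;> simp [List.getD_eq_getElem?_getD, List.getElem?_replicate] <;>
    split_ifs <;> simp

theorem pv_Dfun0 (f : Nat → Nat → Int) (Lk j t : Nat) : Dfun f Lk 0 j t = baseD j t := by
  rw [Dfun, if_neg (by rintro ⟨_, _, h3, h4⟩; omega)]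

theorem pv_dp0_values (Lk : Nat) (hLk : 1 ≤ Lk) (j t : Nat) :
    get2 (set2 (List.replicate (2 ^ Lk) (List.replicate Lk 0)) 1 0 1) j t = baseD j t := by
  have hpow2 : (2 : Nat) ≤ 2 ^ Lk := by
    calc (2 : Nat) = 2 ^ 1 := rfl
    _ ≤ 2 ^ Lk := Nat.pow_le_pow_right (by norm_num) hLk
  have hlen : (1 : Nat) < (List.replicate (2 ^ Lk) (List.replicate Lk (0 : Int))).length := by
    rw [List.length_replicate]; omega
  have hrow : (List.replicate (2 ^ Lk) (List.replicate Lk (0 : Int))).getD 1 []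
      = List.replicate Lk 0 := by
    rw [List.getD_eq_getElem?_getD, List.getElem?_replicate, if_pos (by omega)]
    rfl
  by_cases hj : j = 1 ∧ t = 0
  · obtain ⟨rfl, rfl⟩ := hj
    rw [get2_set2_self 1 hlen (by rw [hrow, List.length_replicate]; omega), baseD, if_pos ⟨rfl, rfl⟩]
  · have hne : (1 : Nat) ≠ j ∨ (0 : Nat) ≠ t := by
      by_cases h1 : j = 1
      · right; intro h0; exact hj ⟨h1, h0.symm⟩
      · left; exact fun hc => h1 hc.symm
    rw [get2_set2_ne 1 hne, pv_get2_replicate, baseD, if_neg hj]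

theorem pvRLfull (Lk : Nat) (hLk : 1 ≤ Lk) :
    (List.range Lk).filter (fun i => (2 ^ Lk - 1).testBit i && !(i == 0))
      = List.range' 1 (Lk - 1) := by
  have hr : List.range Lk = 0 :: List.range' 1 (Lk - 1) := by
    rw [List.range_eq_range', show Lk = (Lk - 1) + 1 by omega, List.range'_succ]
    simp
  rw [hr, List.filter_cons, if_neg (by simp)]
  apply List.filter_eq_self.2
  intro i hi
  obtain ⟨h1, h2⟩ := List.mem_range'_1.1 hi
  rw [Nat.testBit_two_pow_sub_one]
  simp
  constructor
  · omega
  · omega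

theorem pv_getD_inj (verts : List Int) (hnd : verts.Nodup) (Lk : Nat)
    (hlen : verts.length = Lk) :
    ∀ q1 q2, q1 < Lk → q2 < Lk → verts.getD q1 0 = verts.getD q2 0 → q1 = q2 := by
  intro q1 q2 h1 h2 he
  have e1 : verts.getD q1 0 = verts[q1]'(by omega) := by
    rw [List.getD_eq_getElem?_getD, List.getElem?_eq_getElem (by omega)]; rfl
  have e2 : verts.getD q2 0 = verts[q2]'(by omega) := by
    rw [List.getD_eq_getElem?_getD, List.getElem?_eq_getElem (by omega)]; rfl
  rw [e1, e2] at he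
  exact (List.Nodup.getElem_inj_iff hnd).1 he

theorem pv_bodySpec (A : List (List Int)) (L : Int) (verts : List Int)
    (hnd : verts.Nodup) (hlen : verts.length = L.toNat) (h2 : 2 ≤ L.toNat) :
    cycBody A L verts = waysB A (verts.getD 0 0) (verts.getD 0 0) (verts.drop 1) (L.toNat - 1) := by
  have hLk1 : 1 ≤ L.toNat := by omega
  have hpow2 : (2 : Nat) ≤ 2 ^ L.toNat := by
    calc (2 : Nat) = 2 ^ 1 := rfl
    _ ≤ 2 ^ L.toNat := Nat.pow_le_pow_right (by norm_num) hLk1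
  dsimp only [cycBody]
  rw [pv_foldl_if_add (List.range' 1 (L.toNat - 1)) _ _ 0, zero_add]
  have hshape0 : Shape L.toNat (set2 (List.replicate (2 ^ L.toNat)
      (List.replicate L.toNat 0)) 1 0 1) := by
    have hrep : Shape L.toNat (List.replicate (2 ^ L.toNat) (List.replicate L.toNat 0)) := by
      constructor
      · rw [List.length_replicate]
      · intro r hr
        rw [List.eq_of_mem_replicate hr, List.length_replicate]
    exact shape_set2 hrep 1 0 1 (by rw [List.length_replicate]; omega)
  have hval0 : ∀ j t, get2 (set2 (List.replicate (2 ^ L.toNat)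
      (List.replicate L.toNat 0)) 1 0 1) j t
      = Dfun (fun a b => get2 ((List.range L.toNat).map (fun i => (List.range L.toNat).map
          (fun j => pvGet2 A (verts.getD i 0) (verts.getD j 0)))) a b) L.toNat 0 j t := by
    intro j t
    rw [pv_dp0_values L.toNat hLk1 j t, pv_Dfun0]
  have hM := pv_foldM L.toNat hLk1
    (fun a b => get2 ((List.range L.toNat).map (fun i => (List.range L.toNat).map
      (fun j => pvGet2 A (verts.getD i 0) (verts.getD j 0)))) a b)
    (2 ^ L.toNat - 1) (le_refl _) _ hshape0 hval0
  beta_reduce at hM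
  have hterm : ∀ v ∈ List.range' 1 (L.toNat - 1),
      (if get2 ((List.range L.toNat).map (fun i => (List.range L.toNat).map
          (fun j => pvGet2 A (verts.getD i 0) (verts.getD j 0)))) v 0 ≠ 0 then
        get2 ((List.range' 1 (2 ^ L.toNat - 1)).foldl (fun dp m =>
          (List.range L.toNat).foldl (fun dp v =>
            if ¬ m.testBit v ∨ get2 dp m v = 0 then dp
            else (List.range L.toNat).foldl (fun dp u =>
              if m.testBit u then dp
              else if get2 ((List.range L.toNat).map (fun i => (List.range L.toNat).map
                  (fun j => pvGet2 A (verts.getD i 0) (verts.getD j 0)))) v u ≠ 0 then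
                set2 dp (m ||| 2 ^ u) u (get2 dp (m ||| 2 ^ u) u + get2 dp m v)
              else dp) dp) dp)
          (set2 (List.replicate (2 ^ L.toNat) (List.replicate L.toNat 0)) 1 0 1))
          (2 ^ L.toNat - 1) v
      else 0)
      = (if (fun a b => get2 ((List.range L.toNat).map (fun i => (List.range L.toNat).map
          (fun j => pvGet2 A (verts.getD i 0) (verts.getD j 0)))) a b) v 0 ≠ 0 then
          gE (fun a b => get2 ((List.range L.toNat).map (fun i => (List.range L.toNat).map
            (fun j => pvGet2 A (verts.getD i 0) (verts.getD j 0)))) a b)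
            (L.toNat - 1) 0 (List.range' 1 (L.toNat - 1)) v
        else 0) := by
    intro v hv
    obtain ⟨hv1, hv2⟩ := List.mem_range'_1.1 hv
    have hvLk : v < L.toNat := by omega
    have hfull : 2 ^ L.toNat - 1 < 2 ^ L.toNat := by omega
    have htbv : (2 ^ L.toNat - 1).testBit v = true := by
      rw [Nat.testBit_two_pow_sub_one]; simp [hvLk]
    have htb0 : (2 ^ L.toNat - 1).testBit 0 = true := by
      rw [Nat.testBit_two_pow_sub_one]; simp; omega
    rw [hM (2 ^ L.toNat - 1) v,
        Dfun_eq_pc _ L.toNat (2 ^ L.toNat - 1) (2 ^ L.toNat - 1) v hvLk htbv (Nat.sub_le _ _),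
        pvPCGE _ L.toNat (by omega) (2 ^ L.toNat - 1) v hfull htb0 htbv (by omega) hvLk,
        pvRLfull L.toNat hLk1, List.length_range']
  rw [pv_sum_congr _ _ _ hterm]
  have hS := (pvSUMEND (fun a b => get2 ((List.range L.toNat).map
      (fun i => (List.range L.toNat).map
        (fun j => pvGet2 A (verts.getD i 0) (verts.getD j 0)))) a b)
    (L.toNat - 1) 0 (List.range' 1 (L.toNat - 1)) (List.nodup_range' 1)
    (List.length_range') (by omega)).symm
  rw [hS]
  have hMg := pvMAPg A (fun i => verts.getD i 0)
    (fun a b => get2 ((List.range L.toNat).map (fun i => (List.range L.toNat).map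
      (fun j => pvGet2 A (verts.getD i 0) (verts.getD j 0)))) a b) L.toNat
    (fun i j hi hj => by
      exact pv_get2_matrix (fun a b => pvGet2 A (verts.getD a 0) (verts.getD b 0))
        L.toNat i j hi hj)
    (pv_getD_inj verts hnd L.toNat hlen)
    (L.toNat - 1) 0 (List.range' 1 (L.toNat - 1)) (List.nodup_range' 1) (by omega)
    (fun q hq => by
      obtain ⟨h1', h2'⟩ := List.mem_range'_1.1 hq
      omega)
    (by rw [List.length_range'])
  rw [hMg]
  have hdrop : (List.range' 1 (L.toNat - 1)).map (fun i => verts.getD i 0) = verts.drop 1 := by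
    rw [show L.toNat - 1 = verts.length - 1 by rw [hlen]]
    exact pv_map_getD_range' verts 0
  rw [hdrop]

-- ---------- outer assembly ----------
theorem pvTOP (A : List (List Int)) (k : Nat) :
    ∀ (len : Nat) (a n : Int), (n - a).toNat = len →
    ((combosA (PySem.List.pyRange a n 1) (k + 1)).map (fun verts =>
      waysB A (verts.getD 0 0) (verts.getD 0 0) (verts.drop 1) k)).sum
    = ((PySem.List.pyRange a n 1).map (fun s =>
        waysB A s s (PySem.List.pyRange (s + 1) n 1) k)).sum := by
  intro len
  induction len with
  | zero =>
    intro a n h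
    rw [PySem.List.pyRange_one_eq_nil (by omega)]
    show ((combosA [] (k + 1)).map _).sum = _
    simp [combosA]
  | succ len ih =>
    intro a n h
    have ha : a < n := by omega
    rw [PySem.List.pyRange_one_cons ha]
    have hcons : combosA (a :: PySem.List.pyRange (a + 1) n 1) (k + 1)
        = (combosA (PySem.List.pyRange (a + 1) n 1) k).map (fun S => a :: S)
          ++ combosA (PySem.List.pyRange (a + 1) n 1) (k + 1) := rfl
    rw [hcons, List.map_append, List.sum_append, List.map_map]
    simp only [List.map_cons, List.sum_cons]
    have hchunk1 : ((combosA (PySem.List.pyRange (a + 1) n 1) k).map ((fun verts =>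
        waysB A (verts.getD 0 0) (verts.getD 0 0) (verts.drop 1) k) ∘ (fun S => a :: S))).sum
        = ((combosA (PySem.List.pyRange (a + 1) n 1) k).map (fun S =>
            waysB A a a S S.length)).sum := by
      apply pv_sum_congr
      intro S hS
      simp only [Function.comp]
      rw [combosA_length _ _ _ hS]
      rfl
    rw [hchunk1, ← pvKEY A a k a (PySem.List.pyRange (a + 1) n 1)
          (PySem.List.nodup_pyRange_one _ _),
        ih (a + 1) n (by omega)]

-- ===== VERDICT (by name: the statement is the Claim_ definition above) =====
theorem count_cycles_spec : Claim_equal_count_cycles := by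
  intro A n L hDom hPre
  unfold Spec_count_cycles
  obtain ⟨hL1, _⟩ := hPre
  unfold count_cycles count_cycles_alt
  rw [PySem.List.foldl_add (combosA (PySem.List.pyRange 0 n 1) L.toNat)
      (fun verts => cycBody A L verts) 0, zero_add]
  by_cases hL2 : L < 2
  · rw [if_pos hL2]
    have hL1nat : L.toNat = 1 := by omega
    apply List.sum_eq_zero
    intro y hy
    obtain ⟨verts, _, rfl⟩ := List.mem_map.1 hy
    dsimp only [cycBody]
    rw [hL1nat]
    simp
  · push_neg at hL2
    rw [if_neg (by omega)]
    have h2n : 2 ≤ L.toNat := by omega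
    have hstep : ∀ verts ∈ combosA (PySem.List.pyRange 0 n 1) L.toNat,
        cycBody A L verts
          = waysB A (verts.getD 0 0) (verts.getD 0 0) (verts.drop 1) (L.toNat - 1) := by
      intro verts hverts
      exact pv_bodySpec A L verts
        ((combosA_sublist _ _ _ hverts).nodup (PySem.List.nodup_pyRange_one _ _))
        (combosA_length _ _ _ hverts) h2n
    rw [pv_sum_congr _ _ _ hstep]
    obtain ⟨k, hkk⟩ : ∃ k, L.toNat = k + 1 := ⟨L.toNat - 1, by omega⟩
    have hfuel : L.toNat - 1 = k := by omega
    have hfuel2 : (L - 1).toNat = k := by omega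
    rw [hfuel, hkk, hfuel2,
        pvTOP A k (n - 0).toNat 0 n rfl,
        pv_foldl_if_skip (PySem.List.pyRange 0 n 1) (fun s => n - s < L)
          (fun s => waysB A s s (PySem.List.pyRange (s + 1) n 1) k) 0, zero_add]
    apply pv_sum_congr
    intro s' hs'
    by_cases hns : n - s' < L
    · obtain ⟨k2, hk2⟩ : ∃ k2, k = k2 + 1 := ⟨k - 1, by omega⟩
      rw [if_pos hns, hk2, waysB, if_pos (by rw [PySem.List.length_pyRange_one]; omega)]
    · rw [if_neg hns]
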